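-- pv_equiv track=rewrite | github.com/chishige1217200/nabeatu | nabeatu.py | nabeatu
-- ===== SOURCE A (Python) =====
-- def nabeatu(num: int):
--     if num <= 0:
--         return
--     if num % 3 == 0:
--         return True
--
--     s = str(num)
--     for di in s:
--         if int(di) == 3:
--             return True
-- ===== SOURCE B (Python) =====
-- def nabeatu(num: int):
--     if num <= 0:
--         return
--     digit_sum = 0
--     has_three = False
--     for ch in str(num):
--         digit_sum += ord(ch) - 48
--         if ch == '3':
--             has_three = True
--     if digit_sum % 3 == 0 or has_three:
--         return True
-- ===== Notes on version B (the rewrite author's own statement) =====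
-- stated objective: alternative
-- what changed: Replaces the arithmetic num % 3 test plus a separate early-return digit scan by one fused pass over str(num) that accumulates the digit sum (divisibility by 3 via the digit-sum rule) and a has-three flag, deciding after the loop.
import Mathlib
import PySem

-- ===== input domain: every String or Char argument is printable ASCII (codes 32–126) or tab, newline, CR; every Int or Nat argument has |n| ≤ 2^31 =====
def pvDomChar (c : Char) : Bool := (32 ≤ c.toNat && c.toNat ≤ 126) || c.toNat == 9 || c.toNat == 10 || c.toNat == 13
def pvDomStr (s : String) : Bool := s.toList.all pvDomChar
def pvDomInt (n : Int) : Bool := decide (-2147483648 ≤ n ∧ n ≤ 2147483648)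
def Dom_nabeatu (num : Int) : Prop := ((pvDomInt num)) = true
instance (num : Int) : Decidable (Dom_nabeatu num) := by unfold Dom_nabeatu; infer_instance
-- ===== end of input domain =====

-- B fuses A's `num % 3` test and its early-return digit scan into one pass over str(num)
-- accumulating the digit sum (digit-sum divisibility rule) and a has-three flag (alternative, same cost).


-- ===== PORT A =====
-- `for di in s: if int(di) == 3: return True`; falling off the loop returns None.
-- int(di) never raises here: for num > 0 every character of str(num) is a decimal digit.
def nabeatuLoop : List Char → Option Bool
  | [] => none
  | c :: rest => if PySem.Int.ofChars? [c] = some 3 then some true else nabeatuLoop rest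

def nabeatu (num : Int) : Option Bool :=
  if num ≤ 0 then none
  else if PySem.Int.mod num 3 = 0 then some true
  else nabeatuLoop (PySem.Int.toChars num)

-- ===== PORT B =====
def nabeatu_alt (num : Int) : Option Bool :=
  if num ≤ 0 then none
  else
    let st := (PySem.Int.toChars num).foldl
      (fun (p : Int × Bool) c => (p.1 + ((c.toNat : Int) - 48), p.2 || (c == '3'))) (0, false)
    if PySem.Int.mod st.1 3 = 0 || st.2 then some true else none

-- ===== PRECONDITION & SPEC =====
def Spec_nabeatu (num : Int) (out : Option Bool) : Prop := out = nabeatu_alt num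
instance (num : Int) (out : Option Bool) : Decidable (Spec_nabeatu num out) := by unfold Spec_nabeatu; infer_instance

-- ===== CLAIM (what is proved, stated in full; the proofs are below) =====
def Claim_equal_nabeatu : Prop := ∀ (num : Int), Dom_nabeatu num → Spec_nabeatu num (nabeatu num)

-- ===== LEMMAS AND PROOFS =====

-- str(n) for n > 0 is the base-10 digit list, most significant first
lemma toDigitsCore_eq_digits : ∀ (f n : Nat) (ds : List Char), 0 < n → n < f →
    Nat.toDigitsCore 10 f n ds = ((Nat.digits 10 n).map Nat.digitChar).reverse ++ ds := by
  intro f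
  induction f with
  | zero => intro n ds h0 hf; omega
  | succ f ih =>
    intro n ds h0 hf
    show (if n / 10 = 0 then Nat.digitChar (n % 10) :: ds
          else Nat.toDigitsCore 10 f (n / 10) (Nat.digitChar (n % 10) :: ds)) = _
    split_ifs with hdiv
    · have hd : Nat.digits 10 (n / 10) = [] := by rw [hdiv]; simp
      rw [Nat.digits_def' (by norm_num) h0, hd]; simp
    · rw [ih (n / 10) _ (Nat.pos_of_ne_zero hdiv) (by omega),
        Nat.digits_def' (by norm_num) h0]
      simp

lemma toChars_pos (num : Int) (h : 0 < num) :
    PySem.Int.toChars num = ((Nat.digits 10 num.toNat).map Nat.digitChar).reverse := by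
  unfold PySem.Int.toChars
  rw [if_neg (by omega), Nat.toDigits,
    toDigitsCore_eq_digits (num.toNat + 1) num.toNat [] (by omega) (by omega)]
  simp

-- per-digit facts
lemma digitChar_toNat (d : Nat) (hd : d < 10) : ((Nat.digitChar d).toNat : Int) - 48 = (d : Int) := by
  interval_cases d <;> decide

lemma digitChar_eq_three_iff (d : Nat) (hd : d < 10) : Nat.digitChar d = '3' ↔ d = 3 := by
  interval_cases d <;> simp <;> decide

lemma ofChars_digitChar (d : Nat) (hd : d < 10) :
    PySem.Int.ofChars? [Nat.digitChar d] = some (d : Int) := by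
  interval_cases d <;> decide

-- A's loop on a list of digit characters: True iff '3' occurs, else None
lemma nabeatuLoop_eq (cs : List Char)
    (h : ∀ c ∈ cs, ∃ d, d < 10 ∧ c = Nat.digitChar d) :
    nabeatuLoop cs = if '3' ∈ cs then some true else none := by
  induction cs with
  | nil => simp [nabeatuLoop]
  | cons c rest ih =>
    obtain ⟨d, hd, rfl⟩ := h c (List.mem_cons_self ..)
    rw [nabeatuLoop, ofChars_digitChar d hd,
      ih (fun c hc => h c (List.mem_cons_of_mem _ hc))]
    by_cases h3 : d = 3
    · subst h3
      rw [if_pos (by norm_num), if_pos (List.mem_cons.mpr (Or.inl (by decide)))]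
    · have hcond : ¬ (some (d : Int) = some 3) := by
        intro he
        exact h3 (by exact_mod_cast Option.some.inj he)
      rw [if_neg hcond]
      by_cases hr : '3' ∈ rest
      · rw [if_pos hr, if_pos (List.mem_cons_of_mem _ hr)]
      · rw [if_neg hr, if_neg]
        intro hc
        rcases List.mem_cons.mp hc with he | hr2
        · exact h3 ((digitChar_eq_three_iff d hd).mp he.symm)
        · exact hr hr2

-- B's fold in closed form
lemma foldl_sum_flag (cs : List Char) (p : Int × Bool) :
    cs.foldl (fun (p : Int × Bool) c => (p.1 + ((c.toNat : Int) - 48), p.2 || (c == '3'))) p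
      = (p.1 + (cs.map (fun c => (c.toNat : Int) - 48)).sum, p.2 || cs.any (· == '3')) := by
  induction cs generalizing p with
  | nil => simp
  | cons c rest ih =>
    simp only [List.foldl_cons, List.map_cons, List.sum_cons, List.any_cons, ih]
    rw [add_assoc, Bool.or_assoc]

lemma any_eq_decide_mem (l : List Char) : (l.any (· == '3')) = decide ('3' ∈ l) := by
  induction l with
  | nil => simp
  | cons c r ih =>
    rw [List.any_cons, ih, Bool.beq_eq_decide_eq]
    by_cases h : c = '3' <;> by_cases h2 : '3' ∈ r <;> simp [h, h2, eq_comm]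

-- ===== VERDICT (by name: the statement is the Claim_ definition above) =====
theorem nabeatu_spec : Claim_equal_nabeatu := by
  intro num _
  unfold Spec_nabeatu nabeatu nabeatu_alt
  by_cases hle : num ≤ 0
  · simp [hle]
  · rw [if_neg hle, if_neg hle]
    have hpos : 0 < num := by omega
    set n : Nat := num.toNat with hn
    have hnum : num = (n : Int) := by omega
    have hn0 : 0 < n := by omega
    rw [toChars_pos num hpos]
    simp only [foldl_sum_flag, Bool.false_or, zero_add]
    set L : List Nat := Nat.digits 10 n with hL
    have hlt : ∀ d ∈ L, d < 10 := fun d hd => Nat.digits_lt_base (by norm_num) hd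
    -- digit sum
    have hsum : ((L.map Nat.digitChar).reverse.map (fun c => (c.toNat : Int) - 48)).sum
        = (L.sum : Int) := by
      rw [← List.map_reverse, List.map_map,
        List.map_congr_left (l := L.reverse) (f := (fun c => (c.toNat : Int) - 48) ∘ Nat.digitChar)
          (g := (Nat.cast : Nat → Int))
          (fun d hd => by simpa using digitChar_toNat d (hlt d (List.mem_reverse.mp hd))),
        ← Nat.cast_list_sum, List.sum_reverse_nat]
    -- membership of '3'
    have hmem : ('3' ∈ (L.map Nat.digitChar).reverse) ↔ 3 ∈ L := by
      rw [List.mem_reverse, List.mem_map]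
      constructor
      · rintro ⟨d, hd, he⟩
        exact ((digitChar_eq_three_iff d (hlt d hd)).mp he) ▸ hd
      · intro h3; exact ⟨3, h3, rfl⟩
    have hany : ((L.map Nat.digitChar).reverse.any (· == '3')) = decide (3 ∈ L) := by
      rw [any_eq_decide_mem, decide_eq_decide.mpr hmem]
    -- divisibility: 3 ∣ num ↔ 3 ∣ digit sum (the digit-sum rule)
    have hmodeq : n % 3 = L.sum % 3 := Nat.modEq_digits_sum 3 10 (by norm_num) n
    have hA : PySem.Int.mod num 3 = 0 ↔ PySem.Int.mod ((L.sum : Nat) : Int) 3 = 0 := by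
      rw [PySem.Int.mod_eq_zero_iff_dvd, PySem.Int.mod_eq_zero_iff_dvd, hnum]
      exact_mod_cast (show 3 ∣ n ↔ 3 ∣ L.sum by omega)
    rw [hsum, hany]
    by_cases hm : PySem.Int.mod num 3 = 0
    · rw [if_pos hm, if_pos]
      rw [Bool.or_eq_true]
      exact Or.inl (decide_eq_true (hA.mp hm))
    · rw [if_neg hm, nabeatuLoop_eq _ (fun c hc => by
        obtain ⟨d, hd, he⟩ := List.mem_map.mp (List.mem_reverse.mp hc)
        exact ⟨d, hlt d hd, he.symm⟩)]
      have hm' : ¬ (PySem.Int.mod ((L.sum : Nat) : Int) 3 = 0) := fun h => hm (hA.mpr h)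
      by_cases h3 : 3 ∈ L
      · rw [if_pos (hmem.mpr h3), if_pos]
        rw [Bool.or_eq_true]
        exact Or.inr (decide_eq_true h3)
      · rw [if_neg (fun hc => h3 (hmem.mp hc)), if_neg]
        rw [Bool.or_eq_true]
        rintro (hc | hc)
        · exact hm' (of_decide_eq_true hc)
        · exact h3 (of_decide_eq_true hc)
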